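-- pv_equiv track=rewrite | github.com/2043947845/Demo | tools/visualization/plot_ablation_grid.py | get_actual_column_name
-- ===== SOURCE A (Python) =====
-- def get_actual_column_name(columns, target):
--     """Find the exact column name handling potential spacing/slash variations"""
--     for col in columns:
--         if col.strip() == target.strip():
--             return col
--
--     # Fallback loosely matching e.g. 'trainl1_loss' -> 'train/l1_loss'
--     target_clean = target.replace('/', '').replace('_', '')
--     for col in columns:
--         if target_clean in col.replace('/', '').replace('_', ''):
--             return col
--     return None
-- ===== SOURCE B (Python) =====
-- def get_actual_column_name(columns, target):
--     """Find the exact column name handling potential spacing/slash variations"""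
--     target_stripped = target.strip()
--     target_clean = target.replace('/', '').replace('_', '')
--     fallback = None
--     for col in columns:
--         if col.strip() == target_stripped:
--             return col
--         if fallback is None and target_clean in col.replace('/', '').replace('_', ''):
--             fallback = col
--     return fallback
-- ===== Notes on version B (the rewrite author's own statement) =====
-- stated objective: alternative
-- what changed: Collapses A's two sequential scans (exact match, then loose cleaned-substring match) into a single pass that returns on the first exact match and keeps the first loose match as a fallback, hoisting target.strip() and the cleaned target out of the loop.
import Mathlib
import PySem

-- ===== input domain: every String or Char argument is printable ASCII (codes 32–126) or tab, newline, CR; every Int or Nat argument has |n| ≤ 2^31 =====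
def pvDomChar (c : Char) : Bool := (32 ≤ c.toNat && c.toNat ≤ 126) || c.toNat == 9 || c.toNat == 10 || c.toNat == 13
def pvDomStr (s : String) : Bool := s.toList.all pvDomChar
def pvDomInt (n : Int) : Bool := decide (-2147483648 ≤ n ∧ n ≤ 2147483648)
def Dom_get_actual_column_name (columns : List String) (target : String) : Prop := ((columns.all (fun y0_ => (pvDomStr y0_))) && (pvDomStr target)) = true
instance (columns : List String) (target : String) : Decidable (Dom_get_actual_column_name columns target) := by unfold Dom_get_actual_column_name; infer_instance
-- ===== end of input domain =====

-- B collapses A's two sequential scans into one pass with a first-loose-match fallback; return-value equivalence proved.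


-- s.replace('/', '').replace('_', '')
def pvClean (s : String) : String :=
  PySem.Str.replace (PySem.Str.replace s "/" "") "_" ""

-- ===== PORT A =====
-- first loop: for col in columns: if col.strip() == target.strip(): return col
def pvFindExact (target : String) : List String → Option String
  | [] => none
  | col :: rest =>
    if PySem.Str.strip col == PySem.Str.strip target then some col
    else pvFindExact target rest

-- second loop: for col in columns: if target_clean in col.replace('/','').replace('_',''): return col
def pvFindLoose (target_clean : String) : List String → Option String
  | [] => none
  | col :: rest =>
    if PySem.Str.isIn target_clean (pvClean col) then some col
    else pvFindLoose target_clean rest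

def get_actual_column_name (columns : List String) (target : String) : Option String :=
  match pvFindExact target columns with
  | some col => some col
  | none => pvFindLoose (pvClean target) columns

-- ===== PORT B =====
-- single pass: return on exact match, remember the first loose match in `fallback`
def pvAltGo (target_stripped target_clean : String) : List String → Option String → Option String
  | [], fallback => fallback
  | col :: rest, fallback =>
    if PySem.Str.strip col == target_stripped then some col
    else
      pvAltGo target_stripped target_clean rest
        (if fallback.isNone && PySem.Str.isIn target_clean (pvClean col) then some col
         else fallback)

def get_actual_column_name_alt (columns : List String) (target : String) : Option String :=
  pvAltGo (PySem.Str.strip target) (pvClean target) columns none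

-- ===== PRECONDITION & SPEC =====
def Spec_get_actual_column_name (columns : List String) (target : String) (out : Option String) : Prop := out = get_actual_column_name_alt columns target
instance (columns : List String) (target : String) (out : Option String) : Decidable (Spec_get_actual_column_name columns target out) := by unfold Spec_get_actual_column_name; infer_instance

-- ===== CLAIM (what is proved, stated in full; the proofs are below) =====
def Claim_equal_get_actual_column_name : Prop := ∀ (columns : List String) (target : String), Dom_get_actual_column_name columns target → Spec_get_actual_column_name columns target (get_actual_column_name columns target)

-- ===== LEMMAS AND PROOFS =====
-- invariant of B's single pass: an exact match wins outright; otherwise the fallback,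
-- and failing that the first loose match, is returned
lemma pvAltGo_eq (target : String) (cols : List String) (fb : Option String) :
    pvAltGo (PySem.Str.strip target) (pvClean target) cols fb =
      match pvFindExact target cols with
      | some c => some c
      | none =>
        match fb with
        | some f => some f
        | none => pvFindLoose (pvClean target) cols := by
  induction cols generalizing fb with
  | nil => cases fb <;> simp [pvAltGo, pvFindExact, pvFindLoose]
  | cons col rest ih =>
    by_cases hx : PySem.Str.strip col == PySem.Str.strip target
    · simp [pvAltGo, pvFindExact, hx]
    · cases fb with
      | some f => simp [pvAltGo, pvFindExact, hx, ih]
      | none =>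
        simp only [pvAltGo, pvFindExact, pvFindLoose, hx, ih, if_neg, Option.isNone_none,
          Bool.true_and]
        cases pvFindExact target rest <;> split_ifs <;> simp

-- ===== VERDICT (by name: the statement is the Claim_ definition above) =====
theorem get_actual_column_name_spec : Claim_equal_get_actual_column_name := by
  intro columns target _
  unfold Spec_get_actual_column_name get_actual_column_name get_actual_column_name_alt
  rw [pvAltGo_eq]
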